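-- pv_equiv track=rewrite | github.com/hruthyacv/stylemate-outfit-generator | app.py | score_harmony
-- ===== SOURCE A (Python) =====
-- COLOR_GROUPS = {
--     "neutrals": [
--         "white", "cream", "ivory", "beige", "khaki", "sand",
--         "grey", "gray", "charcoal", "black", "navy", "off-white",
--     ],
--     "earthy": [
--         "brown", "camel", "tan", "rust", "terracotta", "olive",
--         "mustard", "taupe", "burgundy", "wine", "chocolate",
--     ],
--     "cool": [
--         "blue", "light blue", "sky blue", "teal", "cyan", "mint",
--         "sage", "green", "forest green", "emerald", "cobalt",
--     ],
--     "warm": [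
--         "red", "pink", "coral", "salmon", "rose", "blush",
--         "peach", "hot pink", "magenta", "fuchsia",
--     ],
--     "bright": [
--         "neon green", "neon pink", "neon yellow", "lime",
--         "bright yellow", "electric blue", "orange",
--     ],
--     "purples": [
--         "purple", "violet", "lavender", "lilac", "mauve", "plum",
--     ],
-- }
--
-- CLASH_PAIRS = [
--     ("bright", "warm"),
--     ("bright", "cool"),
--     ("bright", "purples"),
-- ]
--
-- def get_color_group(color_str):
--     """Return the color group for a given color string."""
--     if not color_str:
--         return "neutrals"
--     lower = color_str.lower()
--     for group, keywords in COLOR_GROUPS.items():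
--         if any(k in lower for k in keywords):
--             return group
--     return "neutrals"
--
-- def colors_clash(color_a, color_b):
--     """Return True if two colors are likely to clash visually."""
--     ga, gb = get_color_group(color_a), get_color_group(color_b)
--     if ga == "neutrals" or gb == "neutrals":
--         return False
--     if ga == gb:
--         return False
--     return any(
--         (ga == x and gb == y) or (ga == y and gb == x)
--         for x, y in CLASH_PAIRS
--     )
--
-- def score_harmony(items):
--     """Score a candidate outfit for color harmony (higher = better)."""
--     score = 0
--     for i in range(len(items)):
--         for j in range(i + 1, len(items)):
--             if colors_clash(items[i].get("color"), items[j].get("color")):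
--                 score -= 2
--             else:
--                 score += 1
--     return score
-- ===== SOURCE B (Python) =====
-- COLOR_GROUPS = {
--     "neutrals": [
--         "white", "cream", "ivory", "beige", "khaki", "sand",
--         "grey", "gray", "charcoal", "black", "navy", "off-white",
--     ],
--     "earthy": [
--         "brown", "camel", "tan", "rust", "terracotta", "olive",
--         "mustard", "taupe", "burgundy", "wine", "chocolate",
--     ],
--     "cool": [
--         "blue", "light blue", "sky blue", "teal", "cyan", "mint",
--         "sage", "green", "forest green", "emerald", "cobalt",
--     ],
--     "warm": [
--         "red", "pink", "coral", "salmon", "rose", "blush",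
--         "peach", "hot pink", "magenta", "fuchsia",
--     ],
--     "bright": [
--         "neon green", "neon pink", "neon yellow", "lime",
--         "bright yellow", "electric blue", "orange",
--     ],
--     "purples": [
--         "purple", "violet", "lavender", "lilac", "mauve", "plum",
--     ],
-- }
--
-- # Flattened (keyword, group) pairs; groups are contiguous blocks in COLOR_GROUPS
-- # order, so the first matching keyword belongs to the first matching group.
-- KEYWORD_GROUP = [(k, g) for g, ks in COLOR_GROUPS.items() for k in ks]
--
--
-- def score_harmony(items):
--     """Score a candidate outfit for color harmony (higher = better).
--
--     O(n): one pass keeps four counters (bright / warm / cool / purples items);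
--     every clashing pair pairs a bright item with a warm, cool or purples one,
--     so  score = C(n,2) - 3 * bright * (warm + cool + purples).
--     """
--     bright = warm = cool = purples = 0
--     n = 0
--     for item in items:
--         n += 1
--         color = item.get("color")
--         g = "neutrals"
--         if color:
--             low = color.lower()
--             g = next((grp for kw, grp in KEYWORD_GROUP if kw in low), "neutrals")
--         if g == "bright":
--             bright += 1
--         elif g == "warm":
--             warm += 1
--         elif g == "cool":
--             cool += 1
--         elif g == "purples":
--             purples += 1
--     return n * (n - 1) // 2 - 3 * bright * (warm + cool + purples)
-- ===== Notes on version B (the rewrite author's own statement) =====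
-- stated objective: faster
-- what changed: Replaces the O(n^2) all-pairs clash loop by one linear pass that classifies each item via a flattened (keyword,group) list and keeps four scalar counters, then uses the closed form score = C(n,2) - 3*bright*(warm+cool+purples).
import Mathlib
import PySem

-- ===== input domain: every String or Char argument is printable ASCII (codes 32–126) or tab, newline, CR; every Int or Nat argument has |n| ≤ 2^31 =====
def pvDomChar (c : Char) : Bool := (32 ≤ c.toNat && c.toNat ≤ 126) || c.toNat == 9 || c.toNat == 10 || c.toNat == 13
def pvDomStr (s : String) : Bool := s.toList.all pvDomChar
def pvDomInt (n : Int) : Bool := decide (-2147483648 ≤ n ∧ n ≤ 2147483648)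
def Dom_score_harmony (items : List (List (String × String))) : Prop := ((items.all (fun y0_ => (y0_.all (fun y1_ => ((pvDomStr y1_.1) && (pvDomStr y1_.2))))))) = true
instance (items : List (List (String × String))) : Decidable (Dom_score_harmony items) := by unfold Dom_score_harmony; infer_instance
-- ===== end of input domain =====

-- B replaces A's O(n^2) all-pairs clash loop by ONE linear pass that classifies each item via a
-- flattened (keyword, group) list and keeps four scalar counters, then applies the closed form
-- score = C(n,2) - 3 * bright * (warm + cool + purples)  (objective: faster).


-- ===== PORT A =====
def pvCOLOR_GROUPS : List (String × List String) :=
  [("neutrals", ["white", "cream", "ivory", "beige", "khaki", "sand",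
                 "grey", "gray", "charcoal", "black", "navy", "off-white"]),
   ("earthy",   ["brown", "camel", "tan", "rust", "terracotta", "olive",
                 "mustard", "taupe", "burgundy", "wine", "chocolate"]),
   ("cool",     ["blue", "light blue", "sky blue", "teal", "cyan", "mint",
                 "sage", "green", "forest green", "emerald", "cobalt"]),
   ("warm",     ["red", "pink", "coral", "salmon", "rose", "blush",
                 "peach", "hot pink", "magenta", "fuchsia"]),
   ("bright",   ["neon green", "neon pink", "neon yellow", "lime",
                 "bright yellow", "electric blue", "orange"]),
   ("purples",  ["purple", "violet", "lavender", "lilac", "mauve", "plum"])]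

def pvCLASH_PAIRS : List (String × String) :=
  [("bright", "warm"), ("bright", "cool"), ("bright", "purples")]

-- dict.get("color") on the association-list encoding of a Python dict (first match, None if absent)
def pvDictGet (d : List (String × String)) (k : String) : Option String :=
  (d.find? (fun p => p.1 == k)).map (·.2)

-- get_color_group: '' and None are falsy → "neutrals"; else first group with a keyword substring match
def get_color_group (color_str : Option String) : String :=
  match color_str with
  | none => "neutrals"
  | some s =>
    if s == "" then "neutrals"
    else
      match pvCOLOR_GROUPS.find? (fun p => p.2.any (fun k => PySem.Str.isIn k (PySem.Str.lower s))) with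
      | some p => p.1
      | none => "neutrals"

def colors_clash (color_a color_b : Option String) : Bool :=
  let ga := get_color_group color_a
  let gb := get_color_group color_b
  if ga == "neutrals" || gb == "neutrals" then false
  else if ga == gb then false
  else pvCLASH_PAIRS.any (fun p => (ga == p.1 && gb == p.2) || (ga == p.2 && gb == p.1))

def score_harmony (items : List (List (String × String))) : Int :=
  (PySem.List.pyRange 0 (PySem.List.len items)).foldl (fun score i =>
    (PySem.List.pyRange (i + 1) (PySem.List.len items)).foldl (fun score j =>
      if colors_clash (pvDictGet (PySem.List.pyGetD items i []) "color")
                      (pvDictGet (PySem.List.pyGetD items j []) "color")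
      then score - 2 else score + 1) score) 0

-- ===== PORT B =====
-- KEYWORD_GROUP = [(k, g) for g, ks in COLOR_GROUPS.items() for k in ks]
def pvKEYWORD_GROUP : List (String × String) :=
  pvCOLOR_GROUPS.flatMap (fun p => p.2.map (fun k => (k, p.1)))

-- per-item classification of B: first matching keyword in the flat list decides the group
def pvGroupB (color : Option String) : String :=
  match color with
  | none => "neutrals"
  | some s =>
    if s == "" then "neutrals"
    else
      match pvKEYWORD_GROUP.find? (fun kv => PySem.Str.isIn kv.1 (PySem.Str.lower s)) with
      | some kv => kv.2
      | none => "neutrals"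

def score_harmony_alt (items : List (List (String × String))) : Int :=
  let st := items.foldl (fun (st : Int × Int × Int × Int × Int) it =>
    let g := pvGroupB ((it.find? (fun kv => kv.1 == "color")).map (·.2))
    if g == "bright" then (st.1 + 1, st.2.1, st.2.2.1, st.2.2.2.1, st.2.2.2.2 + 1)
    else if g == "warm" then (st.1, st.2.1 + 1, st.2.2.1, st.2.2.2.1, st.2.2.2.2 + 1)
    else if g == "cool" then (st.1, st.2.1, st.2.2.1 + 1, st.2.2.2.1, st.2.2.2.2 + 1)
    else if g == "purples" then (st.1, st.2.1, st.2.2.1, st.2.2.2.1 + 1, st.2.2.2.2 + 1)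
    else (st.1, st.2.1, st.2.2.1, st.2.2.2.1, st.2.2.2.2 + 1)) (0, 0, 0, 0, 0)
  let n := st.2.2.2.2
  PySem.Int.floordiv (n * (n - 1)) 2 - 3 * st.1 * (st.2.1 + st.2.2.1 + st.2.2.2.1)

-- ===== PRECONDITION & SPEC =====
def Spec_score_harmony (items : List (List (String × String))) (out : Int) : Prop := out = score_harmony_alt items
instance (items : List (List (String × String))) (out : Int) : Decidable (Spec_score_harmony items out) := by unfold Spec_score_harmony; infer_instance

-- ===== CLAIM (what is proved, stated in full; the proofs are below) =====
def Claim_equal_score_harmony : Prop := ∀ (items : List (List (String × String))), Dom_score_harmony items → Spec_score_harmony items (score_harmony items)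

-- ===== LEMMAS AND PROOFS =====

-- the color group of one item (A's classifier)
def pvG (it : List (String × String)) : String := get_color_group (pvDictGet it "color")

-- clash test on two group names (the body of colors_clash after the groups are computed)
def pvClashG (x y : String) : Bool :=
  if x == "neutrals" || y == "neutrals" then false
  else if x == y then false
  else pvCLASH_PAIRS.any (fun p => (x == p.1 && y == p.2) || (x == p.2 && y == p.1))

-- per-pair score contribution
def pvW (x y : String) : Int := if pvClashG x y then -2 else 1

-- sum of pvW over all unordered pairs (in A's i < j order)
def pvPairSum : List String → Int
  | [] => 0
  | x :: xs => (List.map (pvW x) xs).sum + pvPairSum xs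

def pvCnt (s : String) (gs : List String) : Int := (gs.count s : Int)

-- indicator of x = s
def pvInd (s x : String) : Int := if x = s then 1 else 0

lemma pv_colors_clash_eq (a b : Option String) :
    colors_clash a b = pvClashG (get_color_group a) (get_color_group b) := rfl

lemma pv_pyRange_self (n : Int) : PySem.List.pyRange n n = [] := by
  apply List.eq_nil_iff_forall_not_mem.mpr
  intro x hx
  have := PySem.List.mem_pyRange_one.mp hx
  omega

-- A's value as a double sum over index ranges
lemma pv_A_sum (items : List (List (String × String))) :
    score_harmony items =
      ((PySem.List.pyRange 0 (PySem.List.len items)).map (fun i =>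
        ((PySem.List.pyRange (i + 1) (PySem.List.len items)).map (fun j =>
          pvW (pvG (PySem.List.pyGetD items i [])) (pvG (PySem.List.pyGetD items j [])))).sum)).sum := by
  unfold score_harmony
  have hfun : (fun (score i : Int) =>
      (PySem.List.pyRange (i + 1) (PySem.List.len items)).foldl (fun score j =>
        if colors_clash (pvDictGet (PySem.List.pyGetD items i []) "color")
                        (pvDictGet (PySem.List.pyGetD items j []) "color")
        then score - 2 else score + 1) score) =
      (fun (score i : Int) => score +
        ((PySem.List.pyRange (i + 1) (PySem.List.len items)).map (fun j =>
          pvW (pvG (PySem.List.pyGetD items i [])) (pvG (PySem.List.pyGetD items j [])))).sum) := by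
    funext s i
    have h : (fun (score j : Int) =>
        if colors_clash (pvDictGet (PySem.List.pyGetD items i []) "color")
                        (pvDictGet (PySem.List.pyGetD items j []) "color")
        then score - 2 else score + 1) =
        (fun (score j : Int) => score +
          pvW (pvG (PySem.List.pyGetD items i [])) (pvG (PySem.List.pyGetD items j []))) := by
      funext s j
      rw [pv_colors_clash_eq]
      simp only [pvW, pvG]
      split <;> ring
    rw [h, PySem.List.foldl_add]
  rw [hfun, PySem.List.foldl_add, zero_add]

lemma pv_pairSum_append (xs : List String) (y : String) :
    pvPairSum (xs ++ [y]) = pvPairSum xs + (xs.map (fun x => pvW x y)).sum := by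
  induction xs with
  | nil => simp [pvPairSum]
  | cons x xs ih =>
    simp only [List.cons_append, pvPairSum, List.map_append, List.sum_append, ih,
      List.map_cons, List.map_nil, List.sum_cons, List.sum_nil]
    ring

-- the index double sum is pvPairSum of the mapped group list
lemma pv_idx_sum (g : List (String × String) → String) (items : List (List (String × String))) :
    ((PySem.List.pyRange 0 (PySem.List.len items)).map (fun i =>
      ((PySem.List.pyRange (i + 1) (PySem.List.len items)).map (fun j =>
        pvW (g (PySem.List.pyGetD items i [])) (g (PySem.List.pyGetD items j [])))).sum)).sum
    = pvPairSum (items.map g) := by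
  induction items using List.reverseRecOn with
  | nil => simp [PySem.List.len, pvPairSum]
  | append_singleton xs y ih =>
    have hlen : PySem.List.len (xs ++ [y]) = (xs.length : Int) + 1 := by
      simp [PySem.List.len]
    have hlxs : PySem.List.len xs = (xs.length : Int) := by simp [PySem.List.len]
    have hgetapp : ∀ k : Int, 0 ≤ k → k < (xs.length : Int) →
        PySem.List.pyGetD (xs ++ [y]) k [] = PySem.List.pyGetD xs k [] := by
      intro k hk0 hk1
      rw [PySem.List.pyGetD_eq_getElem _ _ hk0 (by simp; omega),
          PySem.List.pyGetD_eq_getElem _ _ hk0 (by omega)]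
      rw [List.getElem_append_left (by omega)]
    have hgety : PySem.List.pyGetD (xs ++ [y]) (xs.length : Int) [] = y := by
      rw [PySem.List.pyGetD_eq_getElem _ _ (by positivity) (by simp)]
      simp
    rw [hlen, PySem.List.pyRange_one_succ_right (by positivity)]
    rw [List.map_append, List.sum_append]
    have hlast : ((PySem.List.pyRange ((xs.length : Int) + 1) ((xs.length : Int) + 1)).map (fun j =>
        pvW (g (PySem.List.pyGetD (xs ++ [y]) (xs.length : Int) []))
            (g (PySem.List.pyGetD (xs ++ [y]) j [])))).sum = 0 := by
      rw [pv_pyRange_self]; simp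
    have hmain : ((PySem.List.pyRange 0 (xs.length : Int)).map (fun i =>
        ((PySem.List.pyRange (i + 1) ((xs.length : Int) + 1)).map (fun j =>
          pvW (g (PySem.List.pyGetD (xs ++ [y]) i [])) (g (PySem.List.pyGetD (xs ++ [y]) j [])))).sum)).sum
        = ((PySem.List.pyRange 0 (xs.length : Int)).map (fun i =>
            ((PySem.List.pyRange (i + 1) (xs.length : Int)).map (fun j =>
              pvW (g (PySem.List.pyGetD xs i [])) (g (PySem.List.pyGetD xs j [])))).sum
            + pvW (g (PySem.List.pyGetD xs i [])) (g y))).sum := by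
      apply congrArg
      apply List.map_congr_left
      intro i hi
      have hib := PySem.List.mem_pyRange_one.mp hi
      rw [PySem.List.pyRange_one_succ_right (by omega)]
      rw [List.map_append, List.sum_append]
      simp only [List.map_cons, List.map_nil, List.sum_cons, List.sum_nil, add_zero]
      rw [hgety, hgetapp i hib.1 hib.2]
      congr 1
      apply congrArg
      apply List.map_congr_left
      intro j hj
      have hjb := PySem.List.mem_pyRange_one.mp hj
      rw [hgetapp j (by omega) hjb.2]
    rw [hmain]
    simp only [List.map_cons, List.map_nil, List.sum_cons, List.sum_nil]
    rw [hlast, add_zero, PySem.List.sum_map_add_int, ← hlxs, ih]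
    simp only [add_zero, List.map_append, List.map_cons, List.map_nil]
    rw [pv_pairSum_append]
    congr 1
    have hstep : ((PySem.List.pyRange 0 (PySem.List.len xs)).map (fun i =>
        pvW (g (PySem.List.pyGetD xs i [])) (g y)))
        = ((PySem.List.pyRange 0 (PySem.List.len (xs.map g))).map (fun i =>
            pvW (PySem.List.pyGetD (xs.map g) i (g [])) (g y))) := by
      simp only [PySem.List.len, List.length_map]
      apply List.map_congr_left
      intro i _
      rw [PySem.List.pyGetD_map]
    rw [hstep,
        show (fun i => pvW (PySem.List.pyGetD (xs.map g) i (g [])) (g y))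
          = (fun x => pvW x (g y)) ∘ (fun i => PySem.List.pyGetD (xs.map g) i (g [])) from rfl,
        ← List.map_map, PySem.List.map_pyGetD_pyRange_zero]

lemma pvW_eq (x y : String) :
    pvW x y = 1 - 3 * (pvInd "bright" x * (pvInd "warm" y + pvInd "cool" y + pvInd "purples" y)
                       + (pvInd "warm" x + pvInd "cool" x + pvInd "purples" x) * pvInd "bright" y) := by
  by_cases hxb : x = "bright" <;> by_cases hyb : y = "bright" <;>
  by_cases hxw : x = "warm" <;> by_cases hyw : y = "warm" <;>
  by_cases hxc : x = "cool" <;> by_cases hyc : y = "cool" <;>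
  by_cases hxp : x = "purples" <;> by_cases hyp : y = "purples" <;>
  simp_all [pvW, pvClashG, pvCLASH_PAIRS, pvInd]

lemma pv_cnt_cons (s x : String) (xs : List String) :
    pvCnt s (x :: xs) = pvInd s x + pvCnt s xs := by
  simp only [pvCnt, pvInd, List.count_cons]
  by_cases h : x = s
  · simp [h]
    omega
  · simp [h]

lemma pv_row_sum (x : String) (xs : List String) :
    (xs.map (pvW x)).sum =
      (xs.length : Int)
      - 3 * (pvInd "bright" x * (pvCnt "warm" xs + pvCnt "cool" xs + pvCnt "purples" xs)
             + (pvInd "warm" x + pvInd "cool" x + pvInd "purples" x) * pvCnt "bright" xs) := by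
  induction xs with
  | nil => simp [pvCnt]
  | cons z zs ih =>
    simp only [List.map_cons, List.sum_cons, List.length_cons]
    rw [ih, pvW_eq x z, pv_cnt_cons "bright" z zs, pv_cnt_cons "warm" z zs,
        pv_cnt_cons "cool" z zs, pv_cnt_cons "purples" z zs]
    push_cast
    ring

-- the core closed form
lemma pv_pairSum_closed (gs : List String) :
    pvPairSum gs = ((gs.length : Int) * ((gs.length : Int) - 1)) / 2
      - 3 * (pvCnt "bright" gs * pvCnt "warm" gs
             + pvCnt "bright" gs * pvCnt "cool" gs
             + pvCnt "bright" gs * pvCnt "purples" gs) := by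
  induction gs with
  | nil => norm_num [pvPairSum, pvCnt]
  | cons x xs ih =>
    have hT : (((x :: xs).length : Int) * (((x :: xs).length : Int) - 1)) / 2
        = ((xs.length : Int) * ((xs.length : Int) - 1)) / 2 + (xs.length : Int) := by
      simp only [List.length_cons]
      push_cast
      rw [show ((xs.length : Int) + 1) * ((xs.length : Int) + 1 - 1)
            = (xs.length : Int) * ((xs.length : Int) - 1) + (xs.length : Int) * 2 from by ring,
          Int.add_mul_ediv_right _ _ (by norm_num)]
    have hind : ∀ u v : String, u ≠ v → pvInd u x * pvInd v x = 0 := by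
      intro u v huv
      simp only [pvInd]
      by_cases h1 : x = u
      · by_cases h2 : x = v
        · exact absurd (h1.symm.trans h2) huv
        · simp [h2]
      · simp [h1]
    rw [show pvPairSum (x :: xs) = (List.map (pvW x) xs).sum + pvPairSum xs from rfl,
        pv_row_sum, ih, pv_cnt_cons "bright" x xs, pv_cnt_cons "warm" x xs,
        pv_cnt_cons "cool" x xs, pv_cnt_cons "purples" x xs, hT]
    linear_combination 3 * hind "bright" "warm" (by decide)
      + 3 * hind "bright" "cool" (by decide)
      + 3 * hind "bright" "purples" (by decide)

-- B's flat-list classifier agrees with A's grouped classifier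
lemma pv_find_flat (gs : List (String × List String)) (q : String → Bool) :
    ((gs.flatMap (fun p => p.2.map (fun k => (k, p.1)))).find? (fun kv => q kv.1)).map (·.2)
      = ((gs.find? (fun p => p.2.any q)).map (·.1)) := by
  induction gs with
  | nil => rfl
  | cons p ps ih =>
    have hblock : ((p.2.map (fun k => (k, p.1))).find? (fun kv => q kv.1))
        = (p.2.find? q).map (fun k => (k, p.1)) := by
      rw [List.find?_map]; rfl
    rw [List.flatMap_cons, List.find?_append, hblock]
    rcases hfind : p.2.find? q with _ | k
    · have hany : ¬ (p.2.any q = true) := by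
        rw [List.any_eq_true]
        rintro ⟨x, hx, hq⟩
        exact absurd hq (by simpa using (List.find?_eq_none.mp hfind) x hx)
      have hf : p.2.any q = false := by simpa using hany
      rw [List.find?_cons, hf]
      simpa using ih
    · have hany : p.2.any q = true :=
        List.any_eq_true.mpr ⟨k, List.mem_of_find?_eq_some hfind, List.find?_some hfind⟩
      simp [hany]

lemma pv_groupB_eq (c : Option String) : pvGroupB c = get_color_group c := by
  cases c with
  | none => rfl
  | some s =>
    simp only [pvGroupB, get_color_group]
    by_cases h : (s == "") = true
    · simp [h]
    · rw [if_neg h, if_neg h]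
      have hf := pv_find_flat pvCOLOR_GROUPS (fun k => PySem.Str.isIn k (PySem.Str.lower s))
      unfold pvKEYWORD_GROUP
      rcases h1 : (pvCOLOR_GROUPS.flatMap (fun p => p.2.map (fun k => (k, p.1)))).find?
          (fun kv => PySem.Str.isIn kv.1 (PySem.Str.lower s)) with _ | kv <;>
      rcases h2 : pvCOLOR_GROUPS.find?
          (fun p => p.2.any (fun k => PySem.Str.isIn k (PySem.Str.lower s))) with _ | p <;>
      rw [h1, h2] at hf <;> rw [h1, h2] <;> simp_all

-- one step of B's fold adds indicator counts
lemma pv_step_eval (st : Int × Int × Int × Int × Int) (it : List (String × String)) :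
    (let g := pvGroupB ((it.find? (fun kv => kv.1 == "color")).map (·.2))
     if g == "bright" then (st.1 + 1, st.2.1, st.2.2.1, st.2.2.2.1, st.2.2.2.2 + 1)
     else if g == "warm" then (st.1, st.2.1 + 1, st.2.2.1, st.2.2.2.1, st.2.2.2.2 + 1)
     else if g == "cool" then (st.1, st.2.1, st.2.2.1 + 1, st.2.2.2.1, st.2.2.2.2 + 1)
     else if g == "purples" then (st.1, st.2.1, st.2.2.1, st.2.2.2.1 + 1, st.2.2.2.2 + 1)
     else (st.1, st.2.1, st.2.2.1, st.2.2.2.1, st.2.2.2.2 + 1))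
    = (st.1 + pvInd "bright" (pvG it), st.2.1 + pvInd "warm" (pvG it),
       st.2.2.1 + pvInd "cool" (pvG it), st.2.2.2.1 + pvInd "purples" (pvG it),
       st.2.2.2.2 + 1) := by
  have hg : pvGroupB ((it.find? (fun kv => kv.1 == "color")).map (·.2)) = pvG it := by
    rw [pv_groupB_eq]; rfl
  simp only [hg, pvInd]
  by_cases h1 : pvG it = "bright"
  · simp [h1]
  · by_cases h2 : pvG it = "warm"
    · simp [h2]
    · by_cases h3 : pvG it = "cool"
      · simp [h3]
      · by_cases h4 : pvG it = "purples"
        · simp [h1, h2, h3, h4]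
        · simp [h1, h2, h3, h4]

-- B's fold computes the four group counts and the length
lemma pv_fold_counts (its : List (List (String × String))) :
    ∀ (st : Int × Int × Int × Int × Int),
    its.foldl (fun (st : Int × Int × Int × Int × Int) it =>
      let g := pvGroupB ((it.find? (fun kv => kv.1 == "color")).map (·.2))
      if g == "bright" then (st.1 + 1, st.2.1, st.2.2.1, st.2.2.2.1, st.2.2.2.2 + 1)
      else if g == "warm" then (st.1, st.2.1 + 1, st.2.2.1, st.2.2.2.1, st.2.2.2.2 + 1)
      else if g == "cool" then (st.1, st.2.1, st.2.2.1 + 1, st.2.2.2.1, st.2.2.2.2 + 1)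
      else if g == "purples" then (st.1, st.2.1, st.2.2.1, st.2.2.2.1 + 1, st.2.2.2.2 + 1)
      else (st.1, st.2.1, st.2.2.1, st.2.2.2.1, st.2.2.2.2 + 1)) st
    = (st.1 + pvCnt "bright" (its.map pvG), st.2.1 + pvCnt "warm" (its.map pvG),
       st.2.2.1 + pvCnt "cool" (its.map pvG), st.2.2.2.1 + pvCnt "purples" (its.map pvG),
       st.2.2.2.2 + (its.length : Int)) := by
  induction its with
  | nil => intro st; simp [pvCnt]
  | cons it its ih =>
    intro st
    rw [List.foldl_cons, pv_step_eval st it, ih]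
    simp only [List.map_cons, List.length_cons, pv_cnt_cons]
    refine Prod.ext (by ring) (Prod.ext (by ring) (Prod.ext (by ring) (Prod.ext (by ring) ?_)))
    push_cast
    ring

-- B's value in the same closed form as A
lemma pv_B_closed (items : List (List (String × String))) :
    score_harmony_alt items =
      (((items.map pvG).length : Int) * (((items.map pvG).length : Int) - 1)) / 2
      - 3 * (pvCnt "bright" (items.map pvG) * pvCnt "warm" (items.map pvG)
             + pvCnt "bright" (items.map pvG) * pvCnt "cool" (items.map pvG)
             + pvCnt "bright" (items.map pvG) * pvCnt "purples" (items.map pvG)) := by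
  unfold score_harmony_alt
  rw [pv_fold_counts items (0, 0, 0, 0, 0)]
  simp only [List.length_map, zero_add]
  rw [PySem.Int.floordiv_eq_ediv_of_pos (by norm_num)]
  ring_nf

-- ===== VERDICT (by name: the statement is the Claim_ definition above) =====
theorem score_harmony_spec : Claim_equal_score_harmony := by
  intro items _
  unfold Spec_score_harmony
  rw [pv_A_sum, pv_idx_sum pvG, pv_pairSum_closed, pv_B_closed]
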